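-- pv_equiv track=rewrite | github.com/imamcs19/Digital-Quran-Ai---Al-Imamain-Utilize-meta-Deep-Lightweight-SORA-Algorithm | debug_init/srt/srt.py | combine_translations
-- ===== SOURCE A (Python) =====
-- def combine_translations(arabic, indonesian, javanese, english):
--     combined_srt = []
--     blocks = {'arabic': [], 'indonesian': [], 'javanese': [], 'english': []}
--
--     for ar, idn, jv, en in zip(arabic, indonesian, javanese, english):
--         if ar.isdigit():  # Jika ini adalah nomor indeks
--             if all(blocks.values()):  # Gabungkan blok sebelumnya
--                 combined_text = ' || '.join([blocks['arabic'][2], blocks['indonesian'][2], blocks['javanese'][2], blocks['english'][2]])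
--                 combined_srt.append(f"{blocks['arabic'][0]}\n{blocks['arabic'][1]}\n{combined_text}\n")
--             # Reset blok
--             blocks = {'arabic': [ar], 'indonesian': [idn], 'javanese': [jv], 'english': [en]}
--         elif '-->' in ar:  # Baris waktu
--             for lang, line in zip(blocks.keys(), [ar, idn, jv, en]):
--                 blocks[lang].append(line)
--         else:  # Baris teks subtitle
--             for lang, line in zip(blocks.keys(), [ar, idn, jv, en]):
--                 blocks[lang].append(line)
--
--     # Tambahkan blok terakhir
--     if all(blocks.values()):
--         combined_text = ' || '.join([blocks['arabic'][2], blocks['indonesian'][2], blocks['javanese'][2], blocks['english'][2]])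
--         combined_srt.append(f"{blocks['arabic'][0]}\n{blocks['arabic'][1]}\n{combined_text}\n")
--
--     return combined_srt
-- ===== SOURCE B (Python) =====
-- def combine_translations(arabic, indonesian, javanese, english):
--     # Boundary-index arithmetic: no blocks are accumulated and the streams are never
--     # zipped.  Find the digit-line positions in the arabic stream (within the common
--     # length), pair each segment start with the next start, and format by direct
--     # indexing into the four input lists.
--     n = min(len(arabic), len(indonesian), len(javanese), len(english))
--     starts = [k for k in range(n) if arabic[k].isdigit()]
--     out = []
--     for s, e in zip([0] + starts, starts + [n]):
--         if s < e:
--             text = ' || '.join([arabic[s + 2], indonesian[s + 2], javanese[s + 2], english[s + 2]])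
--             out.append(f"{arabic[s]}\n{arabic[s + 1]}\n{text}\n")
--     return out
-- ===== Notes on version B (the rewrite author's own statement) =====
-- stated objective: alternative
-- what changed: A zips the four streams and accumulates a dict of four parallel per-language block lists, flushing on each digit line; B never builds blocks and never zips: it computes the digit-line boundary indices in the arabic stream, pairs each segment start with the next boundary, and formats each non-empty segment by direct indexing into the four input lists.
import Mathlib
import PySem

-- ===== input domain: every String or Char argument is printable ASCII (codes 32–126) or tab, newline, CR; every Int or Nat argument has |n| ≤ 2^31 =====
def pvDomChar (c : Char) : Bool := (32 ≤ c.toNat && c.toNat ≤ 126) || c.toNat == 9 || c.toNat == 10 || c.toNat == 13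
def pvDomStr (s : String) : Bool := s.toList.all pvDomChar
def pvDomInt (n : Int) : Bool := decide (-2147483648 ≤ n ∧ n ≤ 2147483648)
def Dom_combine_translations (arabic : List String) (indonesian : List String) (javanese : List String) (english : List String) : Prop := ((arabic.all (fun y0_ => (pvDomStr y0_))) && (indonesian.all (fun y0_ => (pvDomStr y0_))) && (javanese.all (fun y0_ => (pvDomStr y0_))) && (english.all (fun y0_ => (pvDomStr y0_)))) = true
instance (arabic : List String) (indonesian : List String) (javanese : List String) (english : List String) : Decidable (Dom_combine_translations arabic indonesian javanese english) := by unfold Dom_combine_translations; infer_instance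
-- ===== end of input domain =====

-- B replaces A's stateful pass (zip the four streams, accumulate a dict of four
-- parallel block lists, flush on each digit line) by boundary-index arithmetic:
-- find the digit-line indices, pair each segment start with the next boundary,
-- and format by direct indexing (no per-row block accumulation); objective: alternative.

-- one row of zip(arabic, indonesian, javanese, english)
abbrev PvRow : Type := String × String × String × String

-- zip of the four streams (Python zip truncates to the shortest)
def pvZip4 : List String → List String → List String → List String → List PvRow
  | a :: as, b :: bs, c :: cs, d :: ds => (a, b, c, d) :: pvZip4 as bs cs ds
  | _, _, _, _ => []

-- ===== PORT A =====
-- A's state: (combined_srt, blocks['arabic'], blocks['indonesian'], blocks['javanese'], blocks['english'])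
abbrev PvStA : Type := List String × List String × List String × List String × List String

-- the flushed block text: blocks['arabic'][0] "\n" blocks['arabic'][1] "\n" ' || '.join(index-2 lines) "\n"
-- (blocks[...][i] via pyGetD with default ""; under Pre_ the index is always in range)
def pvFmtA (ba bi bj be : List String) : String :=
  PySem.List.pyGetD ba 0 "" ++ "\n" ++ PySem.List.pyGetD ba 1 "" ++ "\n" ++
    PySem.Str.join " || " [PySem.List.pyGetD ba 2 "", PySem.List.pyGetD bi 2 "",
      PySem.List.pyGetD bj 2 "", PySem.List.pyGetD be 2 ""] ++ "\n"

def pvStepA (st : PvStA) (q : PvRow) : PvStA :=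
  let (acc, ba, bi, bj, be) := st
  if PySem.Str.strIsdigit q.1 then
    if ba ≠ [] ∧ bi ≠ [] ∧ bj ≠ [] ∧ be ≠ [] then
      (acc ++ [pvFmtA ba bi bj be], [q.1], [q.2.1], [q.2.2.1], [q.2.2.2])
    else
      (acc, [q.1], [q.2.1], [q.2.2.1], [q.2.2.2])
  else if PySem.Str.isIn "-->" q.1 then
    (acc, ba ++ [q.1], bi ++ [q.2.1], bj ++ [q.2.2.1], be ++ [q.2.2.2])
  else
    (acc, ba ++ [q.1], bi ++ [q.2.1], bj ++ [q.2.2.1], be ++ [q.2.2.2])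

def combine_translations (arabic : List String) (indonesian : List String) (javanese : List String) (english : List String) : List String :=
  let st := (pvZip4 arabic indonesian javanese english).foldl pvStepA ([], [], [], [], [])
  let (acc, ba, bi, bj, be) := st
  if ba ≠ [] ∧ bi ≠ [] ∧ bj ≠ [] ∧ be ≠ [] then acc ++ [pvFmtA ba bi bj be] else acc

-- ===== PORT B =====
-- n = min(len(arabic), len(indonesian), len(javanese), len(english))
def pvN (a i j e : List String) : Nat := min (min a.length i.length) (min j.length e.length)

-- starts = [k for k in range(n) if arabic[k].isdigit()]  (k < n ≤ len, so getD's default is never read)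
def pvStarts (a : List String) (n : Nat) : List Nat :=
  (List.range n).filter (fun k => PySem.Str.strIsdigit (a.getD k ""))

-- the appended f-string for the segment starting at s (indices in range under Pre_)
def pvFmtIdx (a i j e : List String) (s : Nat) : String :=
  a.getD s "" ++ "\n" ++ a.getD (s + 1) "" ++ "\n" ++
    PySem.Str.join " || " [a.getD (s + 2) "", i.getD (s + 2) "", j.getD (s + 2) "", e.getD (s + 2) ""] ++ "\n"

def combine_translations_alt (arabic : List String) (indonesian : List String) (javanese : List String) (english : List String) : List String :=
  let n := pvN arabic indonesian javanese english
  let starts := pvStarts arabic n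
  (List.zip (0 :: starts) (starts ++ [n])).foldl
    (fun acc p => if p.1 < p.2 then acc ++ [pvFmtIdx arabic indonesian javanese english p.1] else acc) []

-- ===== PRECONDITION & SPEC =====
-- Pre_ excludes exactly the inputs on which Python A raises IndexError: some flushed
-- block (a maximal run of zipped rows delimited by the digit arabic lines, including
-- the run before the first digit line and the final run) is non-empty but shorter
-- than 3 rows, so blocks[...][2] (or [1]) does not exist.  Equivalently: consecutive
-- boundaries (and the last boundary to n) are ≥ 3 apart, and the part before the
-- first boundary is empty or of length ≥ 3.
def Pre_combine_translations (arabic : List String) (indonesian : List String) (javanese : List String) (english : List String) : Prop :=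
  List.IsChain (fun s t => s + 3 ≤ t)
    (pvStarts arabic (pvN arabic indonesian javanese english) ++ [pvN arabic indonesian javanese english]) ∧
  ((pvStarts arabic (pvN arabic indonesian javanese english)).headD (pvN arabic indonesian javanese english) = 0 ∨
   3 ≤ (pvStarts arabic (pvN arabic indonesian javanese english)).headD (pvN arabic indonesian javanese english))

instance (arabic : List String) (indonesian : List String) (javanese : List String) (english : List String) : Decidable (Pre_combine_translations arabic indonesian javanese english) := by unfold Pre_combine_translations; infer_instance

def pvWitness_combine_translations : List String × List String × List String × List String :=
  (["1", "00:00:01,000 --> 00:00:02,000", "bismillah"],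
   ["1", "00:00:01,000 --> 00:00:02,000", "dengan nama Allah"],
   ["1", "00:00:01,000 --> 00:00:02,000", "kanthi asma Allah"],
   ["1", "00:00:01,000 --> 00:00:02,000", "in the name of God"])

def Spec_combine_translations (arabic : List String) (indonesian : List String) (javanese : List String) (english : List String) (out : List String) : Prop := out = combine_translations_alt arabic indonesian javanese english
instance (arabic : List String) (indonesian : List String) (javanese : List String) (english : List String) (out : List String) : Decidable (Spec_combine_translations arabic indonesian javanese english out) := by unfold Spec_combine_translations; infer_instance

-- ===== CLAIM (what is proved, stated in full; the proofs are below) =====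
def Claim_equal_combine_translations : Prop := ∀ (arabic : List String) (indonesian : List String) (javanese : List String) (english : List String), Dom_combine_translations arabic indonesian javanese english → Pre_combine_translations arabic indonesian javanese english → Spec_combine_translations arabic indonesian javanese english (combine_translations arabic indonesian javanese english)

-- ===== LEMMAS AND PROOFS =====

-- default row
def pvD : PvRow := ("", "", "", "")

theorem pvZip4_length : ∀ a i j e, (pvZip4 a i j e).length = pvN a i j e
  | x :: as, y :: bs, z :: cs, w :: ds => by
      simp only [pvZip4, List.length_cons, pvZip4_length as bs cs ds, pvN, List.length_cons]; omega
  | [], _, _, _ => by simp [pvZip4, pvN]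
  | _ :: _, [], _, _ => by simp [pvZip4, pvN]
  | _ :: _, _ :: _, [], _ => by simp [pvZip4, pvN]
  | _ :: _, _ :: _, _ :: _, [] => by simp [pvZip4, pvN]

theorem pvZip4_getD : ∀ (a i j e : List String) (k : Nat), k < pvN a i j e →
    (pvZip4 a i j e).getD k pvD = (a.getD k "", i.getD k "", j.getD k "", e.getD k "")
  | x :: as, y :: bs, z :: cs, w :: ds, k, hk => by
      cases k with
      | zero => simp [pvZip4]
      | succ m =>
          have : m < pvN as bs cs ds := by simp [pvN] at hk ⊢; omega
          simpa [pvZip4, List.getD_cons_succ] using pvZip4_getD as bs cs ds m this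
  | [], _, _, _, k, hk => by simp [pvN] at hk
  | _ :: _, [], _, _, k, hk => by simp [pvN] at hk
  | _ :: _, _ :: _, [], _, k, hk => by simp [pvN] at hk
  | _ :: _, _ :: _, _ :: _, [], k, hk => by simp [pvN] at hk

def pvStartsRow (rows : List PvRow) : List Nat :=
  (List.range rows.length).filter (fun k => PySem.Str.strIsdigit ((rows.getD k pvD).1))

theorem pvStartsRow_zip (a i j e : List String) :
    pvStartsRow (pvZip4 a i j e) = pvStarts a (pvN a i j e) := by
  unfold pvStartsRow pvStarts
  rw [pvZip4_length]
  refine List.filter_congr ?_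
  intro k hk
  rw [pvZip4_getD a i j e k (List.mem_range.mp hk)]

theorem pvStartsRow_cons (q : PvRow) (t : List PvRow) :
    pvStartsRow (q :: t) = (if PySem.Str.strIsdigit q.1 then [0] else []) ++ (pvStartsRow t).map (· + 1) := by
  unfold pvStartsRow
  rw [List.length_cons, List.range_succ_eq_map]
  rw [List.filter_cons]
  rw [List.filter_map]
  have : ((List.range t.length).filter (fun k => PySem.Str.strIsdigit (((q :: t).getD (Nat.succ k) pvD).1)))
      = (List.range t.length).filter (fun k => PySem.Str.strIsdigit ((t.getD k pvD).1)) := by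
    refine List.filter_congr ?_; intro k _; rfl
  simp only [Function.comp_def]
  split <;> simp_all [Nat.succ_eq_add_one]

def pvSeg : List PvRow → List PvRow → List (List PvRow)
  | c, [] => [c]
  | c, q :: t => if PySem.Str.strIsdigit q.1 then c :: pvSeg [q] t else pvSeg (c ++ [q]) t

def pvBlocks (rows : List PvRow) : List Nat → List (List PvRow)
  | [] => []
  | s :: ss => (rows.drop s).take (ss.headD rows.length - s) :: pvBlocks rows ss

theorem pvBlocks_shift (q : PvRow) (t : List PvRow) : ∀ ss : List Nat,
    pvBlocks (q :: t) (ss.map (· + 1)) = pvBlocks t ss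
  | [] => rfl
  | s :: ss => by
      simp only [List.map_cons, pvBlocks, pvBlocks_shift q t ss, List.drop_succ_cons, List.length_cons]
      congr 1
      cases ss <;> simp [Nat.succ_sub_succ]

theorem pvSeg_eq_blocks (rows : List PvRow) : ∀ c : List PvRow,
    pvSeg c rows = (c ++ rows.take ((pvStartsRow rows).headD rows.length)) :: pvBlocks rows (pvStartsRow rows) := by
  induction rows with
  | nil => intro c; simp [pvSeg, pvStartsRow, pvBlocks]
  | cons q t ih =>
      intro c
      rw [pvStartsRow_cons]
      by_cases hd : PySem.Str.strIsdigit q.1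
      · have hd' : PySem.Chars.strIsdigit q.1.toList = true := by simpa using hd
        rw [show pvSeg c (q :: t) = c :: pvSeg [q] t by simp [pvSeg, hd']]
        rw [ih [q]]
        rw [show (if PySem.Str.strIsdigit q.1 then ([0] : List Nat) else []) = [0] from by simp [hd']]
        simp only [List.cons_append, List.nil_append, List.headD_cons, List.take_zero, List.append_nil]
        congr 1
        show _ = pvBlocks (q :: t) (0 :: (pvStartsRow t).map (· + 1))
        simp only [pvBlocks, pvBlocks_shift, List.drop_zero, Nat.sub_zero]
        congr 1
        cases h : pvStartsRow t with
        | nil => simp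
        | cons s ss => simp [List.take_succ_cons]
      · have hd' : PySem.Chars.strIsdigit q.1.toList = false := by simpa using hd
        rw [show pvSeg c (q :: t) = pvSeg (c ++ [q]) t by simp [pvSeg, hd']]
        rw [ih (c ++ [q])]
        rw [show (if PySem.Str.strIsdigit q.1 then ([0] : List Nat) else []) = [] from by simp [hd']]
        simp only [List.nil_append, pvBlocks_shift]
        congr 1
        rw [List.append_assoc]
        congr 1
        cases h : pvStartsRow t with
        | nil => simp
        | cons s ss => simp [List.take_succ_cons]

def pvFmtB (b : List PvRow) : String :=
  (b.getD 0 pvD).1 ++ "\n" ++ (b.getD 1 pvD).1 ++ "\n" ++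
    PySem.Str.join " || " [(b.getD 2 pvD).1, (b.getD 2 pvD).2.1, (b.getD 2 pvD).2.2.1, (b.getD 2 pvD).2.2.2] ++ "\n"

theorem pvFmtA_proj (c : List PvRow) :
    pvFmtA (c.map (·.1)) (c.map (·.2.1)) (c.map (·.2.2.1)) (c.map (·.2.2.2)) = pvFmtB c := by
  have hg : ∀ (i : Nat) (f : PvRow → String), f pvD = "" →
      PySem.List.pyGetD (c.map f) (i : Int) "" = f (c.getD i pvD) := by
    intro i f hf
    simp only [PySem.List.pyGetD_natCast]
    induction c generalizing i with
    | nil => simpa using hf.symm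
    | cons x t ih => cases i with
      | zero => simp
      | succ m => simpa using ih m
  simp only [pvFmtA, pvFmtB]
  rw [show (0 : Int) = ((0 : Nat) : Int) by rfl, show (1 : Int) = ((1 : Nat) : Int) by rfl,
      show (2 : Int) = ((2 : Nat) : Int) by rfl]
  rw [hg 0 (·.1) rfl, hg 1 (·.1) rfl, hg 2 (·.1) rfl, hg 2 (·.2.1) rfl,
      hg 2 (·.2.2.1) rfl, hg 2 (·.2.2.2) rfl]

theorem pvNe_proj (c : List PvRow) :
    ((c.map (·.1)) ≠ [] ∧ (c.map (·.2.1)) ≠ [] ∧ (c.map (·.2.2.1)) ≠ [] ∧ (c.map (·.2.2.2)) ≠ [])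
      ↔ c ≠ [] := by
  cases c <;> simp

def pvRenderList (bs : List (List PvRow)) : List String := (bs.filter (fun b => b ≠ [])).map pvFmtB

theorem pvRenderList_cons (c : List PvRow) (l : List (List PvRow)) :
    pvRenderList (c :: l) = (if c ≠ [] then [pvFmtB c] else []) ++ pvRenderList l := by
  by_cases h : c = [] <;> simp [pvRenderList, h]

theorem pvKey (rows : List PvRow) : ∀ (acc : List String) (c : List PvRow),
    (let st := rows.foldl pvStepA (acc, c.map (·.1), c.map (·.2.1), c.map (·.2.2.1), c.map (·.2.2.2))
     let (a0, ba, bi, bj, be) := st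
     if ba ≠ [] ∧ bi ≠ [] ∧ bj ≠ [] ∧ be ≠ [] then a0 ++ [pvFmtA ba bi bj be] else a0)
    = acc ++ pvRenderList (pvSeg c rows) := by
  induction rows with
  | nil =>
    intro acc c
    show (if _ then _ else _) = _
    rw [show pvSeg c [] = [c] from rfl, pvRenderList_cons]
    by_cases h : c = []
    · simp [h, pvRenderList]
    · have hne := (pvNe_proj c).mpr h
      simp only [hne.1, hne.2.1, hne.2.2.1, hne.2.2.2, ne_eq,
        not_false_eq_true, and_self, if_true, h, if_true, pvFmtA_proj, pvRenderList]
      simp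
  | cons q rows ih =>
    intro acc c
    simp only [List.foldl_cons]
    by_cases hd : PySem.Str.strIsdigit q.1
    · have hd' : PySem.Chars.strIsdigit q.1.toList = true := by simpa using hd
      rw [show pvSeg c (q :: rows) = c :: pvSeg [q] rows from by simp [pvSeg, hd']]
      rw [pvRenderList_cons]
      by_cases hc : c = []
      · have h1 : pvStepA (acc, c.map (·.1), c.map (·.2.1), c.map (·.2.2.1), c.map (·.2.2.2)) q
            = (acc, [q.1], [q.2.1], [q.2.2.1], [q.2.2.2]) := by
          simp [pvStepA, hd', hc]
        rw [h1]
        have := ih acc [q]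
        simp only [List.map_cons, List.map_nil] at this
        rw [this]
        simp [hc]
      · have hne := (pvNe_proj c).mpr hc
        have h1 : pvStepA (acc, c.map (·.1), c.map (·.2.1), c.map (·.2.2.1), c.map (·.2.2.2)) q
            = (acc ++ [pvFmtB c], [q.1], [q.2.1], [q.2.2.1], [q.2.2.2]) := by
          simp only [pvStepA]
          rw [if_pos (by simpa using hd)]
          rw [if_pos ⟨hne.1, hne.2.1, hne.2.2.1, hne.2.2.2⟩, pvFmtA_proj]
        rw [h1]
        have := ih (acc ++ [pvFmtB c]) [q]
        simp only [List.map_cons, List.map_nil] at this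
        rw [this]
        simp [hc]
    · have hd' : PySem.Chars.strIsdigit q.1.toList = false := by simpa using hd
      rw [show pvSeg c (q :: rows) = pvSeg (c ++ [q]) rows from by simp [pvSeg, hd']]
      have h1 : pvStepA (acc, c.map (·.1), c.map (·.2.1), c.map (·.2.2.1), c.map (·.2.2.2)) q
          = (acc, (c ++ [q]).map (·.1), (c ++ [q]).map (·.2.1),
             (c ++ [q]).map (·.2.2.1), (c ++ [q]).map (·.2.2.2)) := by
        by_cases ht : PySem.Str.isIn "-->" q.1 <;> simp [pvStepA, hd']
      rw [h1]
      exact ih acc (c ++ [q])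

theorem pvGetD_slice (rows : List PvRow) (s m r : Nat) (hr : r < m) (hlen : s + r < rows.length) :
    ((rows.drop s).take m).getD r pvD = rows.getD (s + r) pvD := by
  have h1 : r < ((rows.drop s).take m).length := by simp; omega
  rw [List.getD_eq_getElem _ _ h1, List.getD_eq_getElem _ _ hlen]
  simp [List.getElem_take, List.getElem_drop]

theorem pvMem_starts (a : List String) (n : Nat) {s : Nat} (hs : s ∈ pvStarts a n) : s < n := by
  have := List.mem_filter.mp hs
  exact List.mem_range.mp this.1

theorem pvFmtB_slice (a i j e : List String) (s m : Nat) (h3 : 3 ≤ m)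
    (hn : s + 3 ≤ pvN a i j e) :
    pvFmtB (((pvZip4 a i j e).drop s).take m) = pvFmtIdx a i j e s := by
  have hlen := pvZip4_length a i j e
  have hget : ∀ r : Nat, r < 3 →
      ((((pvZip4 a i j e).drop s).take m).getD r pvD) = (a.getD (s + r) "", i.getD (s + r) "", j.getD (s + r) "", e.getD (s + r) "") := by
    intro r hr
    rw [pvGetD_slice _ s m r (by omega) (by omega)]
    exact pvZip4_getD a i j e (s + r) (by omega)
  simp only [pvFmtB, pvFmtIdx, hget 0 (by omega), hget 1 (by omega), hget 2 (by omega)]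
  norm_num

theorem pvBlocks_render (a i j e : List String) : ∀ ss : List Nat,
    (∀ s ∈ ss, s < pvN a i j e) →
    List.IsChain (fun s t => s + 3 ≤ t) (ss ++ [pvN a i j e]) →
    pvRenderList (pvBlocks (pvZip4 a i j e) ss) = ss.map (pvFmtIdx a i j e) := by
  intro ss
  induction ss with
  | nil => intro _ _; rfl
  | cons s ss ih =>
      intro hmem hchain
      have hlen := pvZip4_length a i j e
      have hs : s < pvN a i j e := hmem s (List.mem_cons_self)
      have hchain' : List.IsChain (fun s t => s + 3 ≤ t) (ss ++ [pvN a i j e]) := by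
        simpa using hchain.tail
      have hgap : s + 3 ≤ ss.headD (pvN a i j e) := by
        have h0 := (List.isChain_cons.mp (by simpa using hchain)).1
        rcases ss with _ | ⟨s1, ss'⟩
        · simpa using h0
        · simpa using h0
      have hle : ss.headD (pvN a i j e) ≤ pvN a i j e := by
        rcases ss with _ | ⟨s1, ss'⟩
        · simp
        · exact le_of_lt (hmem s1 (by simp))
      show pvRenderList (_ :: _) = _
      rw [pvRenderList_cons]
      rw [ih (fun t ht => hmem t (List.mem_cons_of_mem _ ht)) hchain']
      have hne : ((pvZip4 a i j e).drop s).take (ss.headD (pvZip4 a i j e).length - s) ≠ [] := by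
        rw [← List.length_pos_iff]
        simp only [List.length_take, List.length_drop, hlen]
        omega
      rw [if_pos hne]
      rw [show ss.headD (pvZip4 a i j e).length = ss.headD (pvN a i j e) by rw [hlen]]
      rw [pvFmtB_slice a i j e s _ (by omega) (by omega)]
      rfl

theorem pvBnf (fmt : Nat → String) : ∀ (l : List Nat) (x n : Nat) (acc : List String),
    List.IsChain (· < ·) (l ++ [n]) →
    (List.zip (x :: l) (l ++ [n])).foldl
        (fun acc p => if p.1 < p.2 then acc ++ [fmt p.1] else acc) acc
      = acc ++ (if x < l.headD n then [fmt x] else []) ++ l.map fmt := by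
  intro l
  induction l with
  | nil =>
      intro x n acc _
      by_cases h : x < n <;> simp [h]
  | cons s ss ih =>
      intro x n acc hchain
      have hchain' : List.IsChain (· < ·) (ss ++ [n]) := by simpa using hchain.tail
      have hlt : s < ss.headD n := by
        have h0 := (List.isChain_cons.mp (by simpa using hchain)).1
        rcases ss with _ | ⟨s1, ss'⟩ <;> simpa using h0
      show ((x, s) :: List.zip (s :: ss) (ss ++ [n])).foldl _ _ = _
      rw [List.foldl_cons]
      rw [ih s n _ hchain']
      rw [if_pos hlt]
      by_cases h : x < s <;> simp [h]

theorem pvA_eq_render (a i j e : List String) :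
    combine_translations a i j e = pvRenderList (pvSeg [] (pvZip4 a i j e)) := by
  have := pvKey (pvZip4 a i j e) [] []
  simpa [combine_translations] using this

theorem pvFinal (a i j e : List String)
    (h1 : List.IsChain (fun s t => s + 3 ≤ t) (pvStarts a (pvN a i j e) ++ [pvN a i j e]))
    (h2 : (pvStarts a (pvN a i j e)).headD (pvN a i j e) = 0 ∨
          3 ≤ (pvStarts a (pvN a i j e)).headD (pvN a i j e)) :
    combine_translations a i j e = combine_translations_alt a i j e := by
  have hlen := pvZip4_length a i j e
  have hmem : ∀ s ∈ pvStarts a (pvN a i j e), s < pvN a i j e := fun s hs => pvMem_starts a _ hs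
  have hh : (pvStarts a (pvN a i j e)).headD (pvN a i j e) ≤ pvN a i j e := by
    cases hst : pvStarts a (pvN a i j e) with
    | nil => simp
    | cons s ss => simpa using le_of_lt (hmem s (by rw [hst]; exact List.mem_cons_self))
  -- A side
  rw [pvA_eq_render, pvSeg_eq_blocks, List.nil_append, pvStartsRow_zip, hlen,
      pvRenderList_cons, pvBlocks_render a i j e _ hmem h1]
  -- B side
  show _ = combine_translations_alt a i j e
  unfold combine_translations_alt
  rw [pvBnf (pvFmtIdx a i j e) (pvStarts a (pvN a i j e)) 0 (pvN a i j e) []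
      (h1.imp (fun hab => by omega))]
  rw [List.nil_append]
  -- match the two heads
  by_cases hpos : 0 < (pvStarts a (pvN a i j e)).headD (pvN a i j e)
  · have h3 : 3 ≤ (pvStarts a (pvN a i j e)).headD (pvN a i j e) := by omega
    have hne : (pvZip4 a i j e).take ((pvStarts a (pvN a i j e)).headD (pvN a i j e)) ≠ [] := by
      rw [← List.length_pos_iff]
      simp only [List.length_take, hlen]
      omega
    rw [if_pos hne, if_pos hpos]
    congr 2
    rw [show (pvZip4 a i j e).take ((pvStarts a (pvN a i j e)).headD (pvN a i j e)) = ((pvZip4 a i j e).drop 0).take ((pvStarts a (pvN a i j e)).headD (pvN a i j e)) from by rw [List.drop_zero]]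
    rw [pvFmtB_slice a i j e 0 _ h3 (by omega)]
  · have h0 : (pvStarts a (pvN a i j e)).headD (pvN a i j e) = 0 := by omega
    have hemp : (pvZip4 a i j e).take ((pvStarts a (pvN a i j e)).headD (pvN a i j e)) = [] := by
      rw [h0]; rfl
    rw [if_neg (not_not_intro hemp), if_neg hpos]

-- ===== VERDICT (by name: the statement is the Claim_ definition above) =====
theorem combine_translations_spec : Claim_equal_combine_translations := by
  intro arabic indonesian javanese english _ hpre
  unfold Spec_combine_translations
  exact pvFinal arabic indonesian javanese english hpre.1 hpre.2
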